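-- pv_equiv track=rewrite | github.com/pypi-data/pypi-mirror-164 | packages/mwot/mwot-0.1.0.tar.gz/mwot-0.1.0/src/mwot/brainfuck/interpreter.py | get_jumps
-- ===== SOURCE A (Python) =====
-- def get_jumps(instructions):
--     """Match brackets and map their positions to each other."""
--     stack = []
--     jumps = {}
--     for pc, cmd in enumerate(instructions):
--         if cmd == '[':
--             stack.append(pc)
--         elif cmd == ']':
--             try:
--                 target = stack.pop()
--             except IndexError:
--                 raise ValueError("unmatched ']'") from None
--             jumps[pc], jumps[target] = target, pc
--     if stack:
--         raise ValueError("unmatched '['")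
--     return jumps
-- ===== SOURCE B (Python) =====
-- def get_jumps(instructions):
--     """Match brackets and map their positions to each other."""
--     jumps = {}
--     n = len(instructions)
--
--     def parse(i):
--         """Scan from i; return n, or the index of the first ']' unmatched at this level."""
--         while i < n:
--             cmd = instructions[i]
--             if cmd == '[':
--                 close = parse(i + 1)
--                 if close == n:
--                     raise ValueError("unmatched '['")
--                 jumps[close] = i
--                 jumps[i] = close
--                 i = close + 1
--             elif cmd == ']':
--                 return i
--             else:
--                 i += 1
--         return n
--
--     if parse(0) != n:
--         raise ValueError("unmatched ']'")
--     return jumps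
-- ===== Notes on version B (the rewrite author's own statement) =====
-- stated objective: alternative
-- what changed: Replaces the explicit open-bracket stack with a recursive-descent parser over the nested bracket structure: each '[' recurses one level deeper and writes both jump entries when its matching ']' is returned.
import Mathlib
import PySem

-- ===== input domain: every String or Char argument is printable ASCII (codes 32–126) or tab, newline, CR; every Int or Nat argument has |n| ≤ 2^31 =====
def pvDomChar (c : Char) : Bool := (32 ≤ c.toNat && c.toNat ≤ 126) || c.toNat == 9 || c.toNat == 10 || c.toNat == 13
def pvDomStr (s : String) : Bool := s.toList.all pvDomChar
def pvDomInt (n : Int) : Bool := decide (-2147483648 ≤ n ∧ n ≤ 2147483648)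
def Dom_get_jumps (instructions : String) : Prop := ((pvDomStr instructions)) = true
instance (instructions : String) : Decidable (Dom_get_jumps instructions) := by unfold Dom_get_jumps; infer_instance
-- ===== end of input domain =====

-- B replaces A's explicit open-bracket stack with a recursive-descent parse of the
-- nested bracket structure (same cost; a different decomposition of the same scan).


-- ===== PORT A =====
-- A's loop: for pc, cmd in enumerate(instructions), carrying (stack, jumps).
-- The stack is held head-first (push/pop at the head = Python append/pop at the end);
-- none = the ValueError "unmatched ']'" raised when popping an empty stack.
def loopA (cs : List Char) (pc : Int) (st : List Int × PySem.Dict Int Int) :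
    Option (List Int × PySem.Dict Int Int) :=
  match cs, st with
  | [], st => some st
  | c :: rest, (stack, jumps) =>
    if c = '[' then loopA rest (pc + 1) (pc :: stack, jumps)
    else if c = ']' then
      match stack with
      | [] => none
      | t :: s' => loopA rest (pc + 1) (s', (jumps.insert pc t).insert t pc)
    else loopA rest (pc + 1) (stack, jumps)

def get_jumps (instructions : String) : List (Int × Int) :=
  match loopA instructions.toList 0 ([], PySem.Dict.empty) with
  | some ([], jumps) => jumps.items
  | _ => []  -- A raises ValueError here ("unmatched ']'" / "unmatched '['"); outside Pre_

-- ===== PORT B =====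
-- B's parse(i): scan from i, recursing at each '['; returns the dict, the stop index and
-- the remaining characters at the stop (head ']' = the first ']' unmatched at this level,
-- [] = end of input). none = a raised ValueError. fuel only makes the recursion total;
-- length+1 is always enough (each call site strictly shrinks the remaining list).
def parseB (fuel : Nat) (cs : List Char) (i : Int) (jumps : PySem.Dict Int Int) :
    Option (PySem.Dict Int Int × Int × List Char) :=
  match fuel with
  | 0 => none
  | fuel + 1 =>
    match cs with
    | [] => some (jumps, i, [])
    | c :: rest =>
      if c = '[' then
        match parseB fuel rest (i + 1) jumps with
        | none => none
        | some (j1, close, rem) =>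
          match rem with
          | ']' :: rem' => parseB fuel rem' (close + 1) ((j1.insert close i).insert i close)
          | _ => none  -- close == n: B raises ValueError "unmatched '['"
      else if c = ']' then some (jumps, i, c :: rest)
      else parseB fuel rest (i + 1) jumps

def get_jumps_alt (instructions : String) : List (Int × Int) :=
  match parseB (instructions.toList.length + 1) instructions.toList 0 PySem.Dict.empty with
  | some (jumps, j, _) =>
      if j = (instructions.toList.length : Int) then jumps.items
      else []  -- parse(0) != n: B raises ValueError "unmatched ']'"; outside Pre_
  | none => []  -- B raises ValueError "unmatched '['"; outside Pre_

-- ===== PRECONDITION & SPEC =====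
-- Pre_ excludes exactly the strings whose brackets are unbalanced, on which A raises
-- ValueError: every prefix has at least as many '[' as ']', and the totals are equal.
def Pre_get_jumps (instructions : String) : Prop :=
  (∀ p ∈ instructions.toList.inits, p.count ']' ≤ p.count '[') ∧
  instructions.toList.count '[' = instructions.toList.count ']'
instance (instructions : String) : Decidable (Pre_get_jumps instructions) := by
  unfold Pre_get_jumps; infer_instance

def pvWitness_get_jumps : String := "+[a[b]c]-"

def Spec_get_jumps (instructions : String) (out : List (Int × Int)) : Prop := out = get_jumps_alt instructions
instance (instructions : String) (out : List (Int × Int)) : Decidable (Spec_get_jumps instructions out) := by unfold Spec_get_jumps; infer_instance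

-- ===== CLAIM (what is proved, stated in full; the proofs are below) =====
def Claim_equal_get_jumps : Prop := ∀ (instructions : String), Dom_get_jumps instructions → Pre_get_jumps instructions → Spec_get_jumps instructions (get_jumps instructions)

-- ===== LEMMAS AND PROOFS =====

-- Simulation: one level of B's parse corresponds to a stack-preserving stretch of A's loop.
lemma parseB_sim : ∀ (f : Nat) (cs : List Char), cs.length + 1 ≤ f →
    ∀ (i : Int) (d : PySem.Dict Int Int),
    (∀ d' j rem, parseB f cs i d = some (d', j, rem) →
        (∃ pre, cs = pre ++ rem ∧ j = i + pre.length ∧ (rem = [] ∨ ∃ r, rem = ']' :: r)) ∧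
        ∀ stack, loopA cs i (stack, d) = loopA rem j (stack, d')) ∧
    (parseB f cs i d = none →
        ∃ l d2, l ≠ [] ∧ ∀ stack, loopA cs i (stack, d) = some (l ++ stack, d2)) := by
  intro f
  induction f with
  | zero => intro cs h; omega
  | succ f ih =>
    intro cs hlen i d
    match cs with
    | [] =>
      constructor
      · intro d' j rem h
        simp [parseB] at h
        obtain ⟨h1, h2, h3⟩ := h
        subst h1; subst h2; subst h3
        exact ⟨⟨[], by simp⟩, fun stack => rfl⟩
      · intro h; simp [parseB] at h
    | c :: rest =>
      have hrest : rest.length + 1 ≤ f := by simp at hlen; omega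
      by_cases hc : c = '['
      · subst hc
        -- the '[' case: an inner parse, then (on success) a match and a continuation parse
        have hmain : ∀ res, parseB (f + 1) ('[' :: rest) i d = res →
            ((∀ d' j rem, res = some (d', j, rem) →
              (∃ pre, '[' :: rest = pre ++ rem ∧ j = i + pre.length ∧
                 (rem = [] ∨ ∃ r, rem = ']' :: r)) ∧
              ∀ stack, loopA ('[' :: rest) i (stack, d) = loopA rem j (stack, d')) ∧
             (res = none → ∃ l d2, l ≠ [] ∧
               ∀ stack, loopA ('[' :: rest) i (stack, d) = some (l ++ stack, d2))) := by
          intro res hres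
          have hstep : ∀ stack, loopA ('[' :: rest) i (stack, d)
              = loopA rest (i + 1) (i :: stack, d) := by intro stack; simp [loopA]
          rcases hin : parseB f rest (i + 1) d with _ | ⟨j1, close, rem1⟩
          · -- inner parse raised
            have hnone := (ih rest hrest (i + 1) d).2 hin
            obtain ⟨l, d2, hl, hloop⟩ := hnone
            have : res = none := by rw [← hres]; simp [parseB, hin]
            subst this
            constructor
            · intro d' j rem h; exact absurd h (by simp)
            · intro _
              refine ⟨l ++ [i], d2, by simp, fun stack => ?_⟩
              rw [hstep stack, hloop (i :: stack)]
              simp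
          · obtain ⟨⟨pre1, hpre1, hclose, hrem1⟩, hloop1⟩ :=
              (ih rest hrest (i + 1) d).1 _ _ _ hin
            rcases hrem1 with rfl | ⟨rem', rfl⟩
            · -- inner parse hit end of input: unmatched '[', B raises
              have : res = none := by rw [← hres]; simp [parseB, hin]
              subst this
              constructor
              · intro d' j rem h; exact absurd h (by simp)
              · intro _
                refine ⟨[i], j1, by simp, fun stack => ?_⟩
                rw [hstep stack, hloop1 (i :: stack)]
                simp [loopA]
            · -- matching ']' found at `close`; continue after recording the jump pair
              have hres' : parseB f rem' (close + 1) ((j1.insert close i).insert i close)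
                  = res := by rw [← hres]; simp [parseB, hin]
              have hrem'len : rem'.length + 1 ≤ f := by
                have : rest.length = pre1.length + (rem'.length + 1) := by rw [hpre1]; simp
                omega
              have hchain : ∀ stack, loopA ('[' :: rest) i (stack, d)
                  = loopA rem' (close + 1) (stack, (j1.insert close i).insert i close) := by
                intro stack
                rw [hstep stack, hloop1 (i :: stack)]
                simp [loopA]
              rcases res with _ | ⟨d', j, rem⟩
              · have hnone := (ih rem' hrem'len (close + 1)
                    ((j1.insert close i).insert i close)).2 hres'
                obtain ⟨l, d2, hl, hloop⟩ := hnone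
                constructor
                · intro d' j rem h; exact absurd h (by simp)
                · intro _
                  exact ⟨l, d2, hl, fun stack => by rw [hchain stack, hloop stack]⟩
              · obtain ⟨⟨pre2, hpre2, hj, hrem2⟩, hloop2⟩ :=
                  (ih rem' hrem'len (close + 1) ((j1.insert close i).insert i close)).1
                    _ _ _ hres'
                constructor
                · intro d'' j' rem'' h
                  injection h with h; injection h with h1 h; injection h with h2 h3
                  subst h1; subst h2; subst h3
                  refine ⟨⟨'[' :: pre1 ++ ']' :: pre2, ?_, ?_, hrem2⟩, ?_⟩
                  · simp [hpre1, hpre2]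
                  · simp at hj hclose ⊢; omega
                  · intro stack; rw [hchain stack, hloop2 stack]
                · intro h; exact absurd h (by simp)
        exact hmain _ rfl
      · by_cases hc2 : c = ']'
        · subst hc2
          constructor
          · intro d' j rem h
            simp [parseB, hc] at h
            obtain ⟨h1, h2, h3⟩ := h
            subst h1; subst h2; subst h3
            exact ⟨⟨[], by simp⟩, fun stack => rfl⟩
          · intro h; simp [parseB, hc] at h
        · -- any other character: skip it
          have hres' : parseB f rest (i + 1) d = parseB (f + 1) (c :: rest) i d := by
            simp [parseB, hc, hc2]
          have hstep : ∀ stack, loopA (c :: rest) i (stack, d)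
              = loopA rest (i + 1) (stack, d) := by intro stack; simp [loopA, hc, hc2]
          constructor
          · intro d' j rem h
            rw [← hres'] at h
            obtain ⟨⟨pre, hpre, hj, hrem⟩, hloop⟩ := (ih rest hrest (i + 1) d).1 _ _ _ h
            refine ⟨⟨c :: pre, by simp [hpre], by simp at hj ⊢; omega, hrem⟩, ?_⟩
            intro stack; rw [hstep stack, hloop stack]
          · intro h
            rw [← hres'] at h
            obtain ⟨l, d2, hl, hloop⟩ := (ih rest hrest (i + 1) d).2 h
            exact ⟨l, d2, hl, fun stack => by rw [hstep stack, hloop stack]⟩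

-- ===== VERDICT (by name: the statement is the Claim_ definition above) =====
theorem get_jumps_spec : Claim_equal_get_jumps := by
  intro s _ _
  unfold Spec_get_jumps get_jumps get_jumps_alt
  rcases hp : parseB (s.toList.length + 1) s.toList 0 PySem.Dict.empty with _ | ⟨d', j, rem⟩
  · obtain ⟨l, d2, hl, hloop⟩ := (parseB_sim _ s.toList (by omega) 0 PySem.Dict.empty).2 hp
    have hA : loopA s.toList 0 ([], PySem.Dict.empty) = some (l, d2) := by
      have := hloop []; simpa using this
    rw [hA]
    rcases l with _ | ⟨x, l'⟩
    · exact absurd rfl hl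
    · simp
  · obtain ⟨⟨pre, hpre, hj, hrem⟩, hloop⟩ :=
      (parseB_sim _ s.toList (by omega) 0 PySem.Dict.empty).1 _ _ _ hp
    rcases hrem with rfl | ⟨r, rfl⟩
    · have hpre' : pre = s.toList := by simpa using hpre.symm
      have hjn : j = (s.toList.length : Int) := by rw [hj, hpre']; simp
      rw [hloop [], hjn]
      simp [loopA]
    · have hlt : pre.length < s.toList.length := by rw [hpre]; simp
      have hjn : ¬ j = (s.toList.length : Int) := by rw [hj]; omega
      rw [hloop []]
      simp [loopA]
      intro h
      rw [← String.length_toList] at h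
      exact absurd h hjn
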